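-- pv_equiv track=rewrite | github.com/DamianDuy1302/PTIT-Python | PY01066-XauThangBang.py | solve
-- ===== SOURCE A (Python) =====
-- def solve(s1):
--         s2 = s1[::-1]
--         for i in range(1, len(s1)):
--             a1 = ord(s1[i]) - ord(s1[i-1])
--             a2 = ord(s2[i]) - ord(s2[i-1])
--             if(abs(a1) != abs(a2)):
--                 return "NO"
--         return "YES"
-- ===== SOURCE B (Python) =====
-- def solve(s1):
--     lo, hi = 0, len(s1) - 1
--     while lo + 1 < hi:
--         if abs(ord(s1[lo + 1]) - ord(s1[lo])) != abs(ord(s1[hi]) - ord(s1[hi - 1])):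
--             return "NO"
--         lo += 1
--         hi -= 1
--     return "YES"
-- ===== Notes on version B (the rewrite author's own statement) =====
-- stated objective: alternative
-- what changed: B drops the reversed copy entirely and runs a two-pointer loop converging from both ends of the original string, checking each mirror pair of adjacent differences once, instead of A's full left-to-right scan over the string and its reversal.
import Mathlib
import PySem

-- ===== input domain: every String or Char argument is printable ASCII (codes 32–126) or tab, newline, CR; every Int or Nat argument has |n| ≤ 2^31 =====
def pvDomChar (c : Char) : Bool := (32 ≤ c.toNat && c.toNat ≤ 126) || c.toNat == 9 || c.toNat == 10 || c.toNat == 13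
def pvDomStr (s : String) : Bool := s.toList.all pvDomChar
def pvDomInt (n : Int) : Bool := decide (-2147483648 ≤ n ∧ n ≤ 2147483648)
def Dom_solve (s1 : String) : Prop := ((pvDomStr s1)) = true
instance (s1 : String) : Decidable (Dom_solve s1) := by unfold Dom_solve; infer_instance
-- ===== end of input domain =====

-- B replaces A's scan over the string and its reversed copy by a two-pointer
-- loop converging from both ends of the original string (no reversed copy built).

-- ===== PORT A =====
-- ord(l[i]) as an Int; every index A's loop produces is in range, so getD's default is never used
def pvOrd (l : List Char) (i : Nat) : Int := ((l.getD i ' ').toNat : Int)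

-- the 'for i in range(1, len(s1))' loop with early return "NO"
def solveLoop (l1 l2 : List Char) (i : Nat) : String :=
  if _h : i < l1.length then
    if (pvOrd l1 i - pvOrd l1 (i-1)).natAbs ≠ (pvOrd l2 i - pvOrd l2 (i-1)).natAbs then "NO"
    else solveLoop l1 l2 (i+1)
  else "YES"
termination_by l1.length - i

def solve (s1 : String) : String :=
  let l1 := s1.toList
  let l2 := l1.reverse        -- s2 = s1[::-1]
  solveLoop l1 l2 1

-- ===== PORT B =====
-- the 'while lo + 1 < hi' two-pointer loop; all indices it reads are in range
def altLoop (l : List Char) (lo hi : Nat) : String :=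
  if _h : lo + 1 < hi then
    if (pvOrd l (lo+1) - pvOrd l lo).natAbs ≠ (pvOrd l hi - pvOrd l (hi-1)).natAbs then "NO"
    else altLoop l (lo+1) (hi-1)
  else "YES"
termination_by hi - lo

def solve_alt (s1 : String) : String :=
  altLoop s1.toList 0 (s1.toList.length - 1)

-- ===== PRECONDITION & SPEC =====
def Spec_solve (s1 : String) (out : String) : Prop := out = solve_alt s1
instance (s1 : String) (out : String) : Decidable (Spec_solve s1 out) := by unfold Spec_solve; infer_instance

-- ===== CLAIM (what is proved, stated in full; the proofs are below) =====
def Claim_equal_solve : Prop := ∀ (s1 : String), Dom_solve s1 → Spec_solve s1 (solve s1)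

-- ===== LEMMAS AND PROOFS =====

-- abs adjacent difference at index i
def pvD (l : List Char) (i : Nat) : Nat := (pvOrd l (i+1) - pvOrd l i).natAbs

-- the per-index check of A's loop
abbrev pvP (l1 l2 : List Char) (j : Nat) : Prop :=
  (pvOrd l1 j - pvOrd l1 (j-1)).natAbs = (pvOrd l2 j - pvOrd l2 (j-1)).natAbs

lemma solveLoop_eq (l1 l2 : List Char) (i : Nat) :
    solveLoop l1 l2 i = if ∀ j, i ≤ j → j < l1.length → pvP l1 l2 j then "YES" else "NO" := by
  fun_induction solveLoop l1 l2 i with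
  | case1 i h hbad =>
      rw [if_neg]
      intro hall
      exact hbad (hall i le_rfl h)
  | case2 i h hgood ih =>
      rw [ih]
      by_cases hall : ∀ j, i ≤ j → j < l1.length → pvP l1 l2 j
      · rw [if_pos hall, if_pos]
        intro j hj hjl; exact hall j (by omega) hjl
      · rw [if_neg hall, if_neg]
        intro hall'
        apply hall
        intro j hj hjl
        rcases Nat.eq_or_lt_of_le hj with rfl | hlt
        · simpa [pvP] using not_not.mp (by simpa using hgood)
        · exact hall' j (by omega) hjl
  | case3 i h =>
      rw [if_pos]
      intro j hj hjl; omega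

lemma pvOrd_reverse (l : List Char) (k : Nat) (hk : k < l.length) :
    pvOrd l.reverse k = pvOrd l (l.length - 1 - k) := by
  unfold pvOrd
  rw [List.getD_eq_getElem _ _ (by simpa using hk),
      List.getD_eq_getElem _ _ (by omega),
      List.getElem_reverse]

lemma natAbs_sub_comm' (a b : Int) : (a - b).natAbs = (b - a).natAbs := by
  rw [← Int.natAbs_neg]; ring_nf

-- A's loop condition, rewritten as symmetry of the abs-diff function
-- A's loop condition, rewritten as symmetry of the abs-diff function
lemma Acond_iff (l : List Char) :
    (∀ j, 1 ≤ j → j < l.length → pvP l l.reverse j) ↔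
      (∀ i, i + 1 < l.length → pvD l i = pvD l (l.length - 2 - i)) := by
  constructor
  · intro hall i hi
    have hP := hall (i+1) (by omega) (by omega)
    unfold pvP at hP
    rw [pvOrd_reverse _ _ (by omega), pvOrd_reverse _ _ (by omega)] at hP
    simp only [Nat.add_sub_cancel] at hP
    unfold pvD
    rw [show l.length - 1 - (i+1) = l.length - 2 - i by omega] at hP
    rw [show l.length - 2 - i + 1 = l.length - 1 - i by omega,
        natAbs_sub_comm' (pvOrd l (l.length - 1 - i))]
    exact hP
  · intro hsym j hj hjl
    have hD := hsym (j-1) (by omega)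
    unfold pvP
    rw [pvOrd_reverse _ _ (by omega), pvOrd_reverse _ _ (by omega)]
    unfold pvD at hD
    rw [show j - 1 + 1 = j by omega,
        show l.length - 2 - (j-1) = l.length - 1 - j by omega,
        show l.length - 1 - j + 1 = l.length - j by omega] at hD
    rw [show l.length - 1 - (j-1) = l.length - j by omega,
        natAbs_sub_comm' (pvOrd l (l.length - 1 - j))]
    exact hD

-- B's loop, characterized: each iteration checks the pair (k, lo+hi-1-k)
lemma altLoop_eq (l : List Char) (lo hi : Nat) :
    altLoop l lo hi =
      if ∀ k, k < lo + hi → lo ≤ k → 2*k + 1 < lo + hi → pvD l k = pvD l (lo + hi - 1 - k)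
      then "YES" else "NO" := by
  fun_induction altLoop l lo hi with
  | case1 lo hi h hbad =>
      rw [if_neg]
      intro hall
      apply hbad
      have hx := hall lo (by omega) le_rfl (by omega)
      unfold pvD at hx
      rwa [show lo + hi - 1 - lo = hi - 1 by omega, show hi - 1 + 1 = hi by omega] at hx
  | case2 lo hi h hgood ih =>
      have hm : lo + 1 + (hi - 1) = lo + hi := by omega
      rw [ih, hm]
      by_cases hall : ∀ k, k < lo + hi → lo ≤ k → 2*k + 1 < lo + hi → pvD l k = pvD l (lo + hi - 1 - k)
      · rw [if_pos hall, if_pos]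
        intro k h1 h2 h3; exact hall k h1 (by omega) h3
      · rw [if_neg hall, if_neg]
        intro hall'
        apply hall
        intro k h1 h2 h3
        rcases Nat.eq_or_lt_of_le h2 with rfl | hlt
        · have hg := not_not.mp (by simpa using hgood)
          unfold pvD
          rw [show lo + hi - 1 - lo = hi - 1 by omega, show hi - 1 + 1 = hi by omega]
          exact hg
        · exact hall' k h1 (by omega) h3
  | case3 lo hi h =>
      rw [if_pos]
      intro k h1 h2 h3; omega

-- the half-range symmetry checked by B implies (and is implied by) the full-range one of A
lemma sym_iff (l : List Char) :
    (∀ k, k < l.length - 1 → 0 ≤ k → 2*k + 1 < l.length - 1 → pvD l k = pvD l (l.length - 1 - 1 - k)) ↔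
      (∀ i, i + 1 < l.length → pvD l i = pvD l (l.length - 2 - i)) := by
  constructor
  · intro hhalf i hi
    rcases Nat.lt_trichotomy (2*i + 2) l.length with hlt | heq | hgt
    · have h := hhalf i (by omega) (by omega) (by omega)
      rwa [show l.length - 1 - 1 - i = l.length - 2 - i by omega] at h
    · rw [show l.length - 2 - i = i by omega]
    · have h := hhalf (l.length - 2 - i) (by omega) (by omega) (by omega)
      rw [show l.length - 1 - 1 - (l.length - 2 - i) = i by omega] at h
      exact h.symm
  · intro hfull k h1 _ h3
    have h := hfull k (by omega)
    rwa [show l.length - 2 - k = l.length - 1 - 1 - k by omega] at h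

-- ===== VERDICT (by name: the statement is the Claim_ definition above) =====
theorem solve_spec : Claim_equal_solve := by
  intro s1 _
  unfold Spec_solve solve solve_alt
  simp only
  rw [solveLoop_eq, altLoop_eq]
  simp only [Nat.zero_add]
  rcases Acond_iff s1.toList with ⟨hA1, hA2⟩
  rcases sym_iff s1.toList with ⟨hB1, hB2⟩
  by_cases hc : ∀ i, i + 1 < s1.toList.length → pvD s1.toList i = pvD s1.toList (s1.toList.length - 2 - i)
  · rw [if_pos (hA2 hc), if_pos]
    intro k h1 h2 h3
    exact hB2 hc k h1 h2 h3
  · rw [if_neg (fun h => hc (hA1 h)), if_neg]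
    intro hall
    exact hc (hB1 hall)
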